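-- pv_equiv track=rewrite | github.com/vaibhavshiroorkar/pcease | backend/app/routers/advisor.py | _get_gpu_tier
-- ===== SOURCE A (Python) =====
-- def _get_gpu_tier(gpu: dict) -> int:
--     """Rate GPU on a 1-5 scale based on name heuristics"""
--     name = (gpu.get("name") or "").lower()
--     if any(x in name for x in ["4090", "4080", "7900 xtx", "7900 xt"]):
--         return 5
--     if any(x in name for x in ["4070 ti", "4070 super", "7800 xt"]):
--         return 4
--     if any(x in name for x in ["4060 ti", "4070", "7700 xt", "6800"]):
--         return 3
--     if any(x in name for x in ["4060", "6700", "7600"]):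
--         return 2
--     return 1
-- ===== SOURCE B (Python) =====
-- _TIER_BY_PATTERN = {
--     "4090": 5, "4080": 5, "7900 xtx": 5, "7900 xt": 5,
--     "4070 ti": 4, "4070 super": 4, "7800 xt": 4,
--     "4060 ti": 3, "4070": 3, "7700 xt": 3, "6800": 3,
--     "4060": 2, "6700": 2, "7600": 2,
-- }
--
-- def _get_gpu_tier(gpu: dict) -> int:
--     """Rate GPU on a 1-5 scale based on name heuristics"""
--     name = (gpu.get("name") or "").lower()
--     return max((t for p, t in _TIER_BY_PATTERN.items() if p in name), default=1)
-- ===== Notes on version B (the rewrite author's own statement) =====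
-- stated objective: alternative
-- what changed: Replaced the priority-ordered if/any branch chain by a flat pattern-to-tier dict and one max over the tiers of ALL matching patterns (max with default 1); this is a different algorithm that happens to agree because overlapping patterns assign the higher tier to the longer pattern.
import Mathlib
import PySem

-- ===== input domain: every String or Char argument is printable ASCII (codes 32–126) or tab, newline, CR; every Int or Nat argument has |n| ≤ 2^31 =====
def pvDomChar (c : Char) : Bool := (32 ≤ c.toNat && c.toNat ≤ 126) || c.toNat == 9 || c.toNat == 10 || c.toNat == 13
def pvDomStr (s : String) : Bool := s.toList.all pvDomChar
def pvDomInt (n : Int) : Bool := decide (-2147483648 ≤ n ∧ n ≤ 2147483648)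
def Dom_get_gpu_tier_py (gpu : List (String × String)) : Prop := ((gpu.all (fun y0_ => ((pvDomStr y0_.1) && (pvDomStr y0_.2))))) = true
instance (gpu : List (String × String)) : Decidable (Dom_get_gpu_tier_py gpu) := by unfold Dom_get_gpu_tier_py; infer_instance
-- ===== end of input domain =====

-- B replaces A's priority-ordered branch chain by a max over ALL matching patterns in a flat
-- pattern→tier map (alternative decomposition; correct because overlapping patterns map the
-- longer pattern to the higher tier, so the maximum matching tier equals the first matching block).


-- ===== PORT A =====
-- name = (gpu.get("name") or "").lower(): 'or ""' maps an empty value to "".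
def get_gpu_tier_py (gpu : List (String × String)) : Int :=
  let v : String := (PySem.Dict.get? (PySem.Dict.mk gpu) "name").getD ""
  let name : String := PySem.Str.lower (if v = "" then "" else v)
  if ["4090", "4080", "7900 xtx", "7900 xt"].any (fun x => PySem.Str.isIn x name) then 5
  else if ["4070 ti", "4070 super", "7800 xt"].any (fun x => PySem.Str.isIn x name) then 4
  else if ["4060 ti", "4070", "7700 xt", "6800"].any (fun x => PySem.Str.isIn x name) then 3
  else if ["4060", "6700", "7600"].any (fun x => PySem.Str.isIn x name) then 2
  else 1

-- ===== PORT B =====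
-- the flat pattern → tier map of Source B (a dict, in insertion order)
def pvTierByPattern : List (String × Int) :=
  [("4090", 5), ("4080", 5), ("7900 xtx", 5), ("7900 xt", 5),
   ("4070 ti", 4), ("4070 super", 4), ("7800 xt", 4),
   ("4060 ti", 3), ("4070", 3), ("7700 xt", 3), ("6800", 3),
   ("4060", 2), ("6700", 2), ("7600", 2)]

-- max(t for p, t in _TIER_BY_PATTERN.items() if p in name), default=1 — as a fold
def get_gpu_tier_py_alt (gpu : List (String × String)) : Int :=
  let v : String := (PySem.Dict.get? (PySem.Dict.mk gpu) "name").getD ""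
  let name : String := PySem.Str.lower (if v = "" then "" else v)
  pvTierByPattern.foldl (fun acc pt => if PySem.Str.isIn pt.1 name then max acc pt.2 else acc) 1

-- ===== PRECONDITION & SPEC =====
def Spec_get_gpu_tier_py (gpu : List (String × String)) (out : Int) : Prop := out = get_gpu_tier_py_alt gpu
instance (gpu : List (String × String)) (out : Int) : Decidable (Spec_get_gpu_tier_py gpu out) := by unfold Spec_get_gpu_tier_py; infer_instance

-- ===== CLAIM (what is proved, stated in full; the proofs are below) =====
def Claim_equal_get_gpu_tier_py : Prop := ∀ (gpu : List (String × String)), Dom_get_gpu_tier_py gpu → Spec_get_gpu_tier_py gpu (get_gpu_tier_py gpu)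

-- ===== LEMMAS AND PROOFS =====
-- For every combination of the 14 match bits, the priority chain equals the fold of max.
theorem pvChain_eq_fold : ∀ (b1 b2 b3 b4 b5 b6 b7 b8 b9 b10 b11 b12 b13 b14 : Bool),
    (if b1 || b2 || b3 || b4 then (5:Int)
     else if b5 || b6 || b7 then 4
     else if b8 || b9 || b10 || b11 then 3
     else if b12 || b13 || b14 then 2
     else 1)
    = List.foldl (fun acc (pt : Bool × Int) => if pt.1 then max acc pt.2 else acc) 1
        [(b1,5),(b2,5),(b3,5),(b4,5),(b5,4),(b6,4),(b7,4),(b8,3),(b9,3),(b10,3),(b11,3),(b12,2),(b13,2),(b14,2)] := by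
  decide

theorem pvMain (name : String) :
    (if ["4090", "4080", "7900 xtx", "7900 xt"].any (fun x => PySem.Str.isIn x name) then (5:Int)
     else if ["4070 ti", "4070 super", "7800 xt"].any (fun x => PySem.Str.isIn x name) then 4
     else if ["4060 ti", "4070", "7700 xt", "6800"].any (fun x => PySem.Str.isIn x name) then 3
     else if ["4060", "6700", "7600"].any (fun x => PySem.Str.isIn x name) then 2
     else 1)
    = pvTierByPattern.foldl (fun acc pt => if PySem.Str.isIn pt.1 name then max acc pt.2 else acc) 1 := by
  have h := pvChain_eq_fold (PySem.Str.isIn "4090" name) (PySem.Str.isIn "4080" name)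
    (PySem.Str.isIn "7900 xtx" name) (PySem.Str.isIn "7900 xt" name)
    (PySem.Str.isIn "4070 ti" name) (PySem.Str.isIn "4070 super" name) (PySem.Str.isIn "7800 xt" name)
    (PySem.Str.isIn "4060 ti" name) (PySem.Str.isIn "4070" name) (PySem.Str.isIn "7700 xt" name)
    (PySem.Str.isIn "6800" name)
    (PySem.Str.isIn "4060" name) (PySem.Str.isIn "6700" name) (PySem.Str.isIn "7600" name)
  simp only [pvTierByPattern, List.foldl_cons, List.foldl_nil, List.any_cons, List.any_nil,
    Bool.or_false, Bool.or_assoc] at h ⊢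
  exact h

-- ===== VERDICT (by name: the statement is the Claim_ definition above) =====
theorem get_gpu_tier_py_spec : Claim_equal_get_gpu_tier_py := by
  intro gpu _
  unfold Spec_get_gpu_tier_py get_gpu_tier_py get_gpu_tier_py_alt
  exact pvMain _
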